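-- pv_equiv track=rewrite | github.com/radimzitka/advent-2021 | 12.py | find_continued
-- ===== SOURCE A (Python) =====
-- def two_lower(path, rule):
--     if(path.count(rule) == 0):
--         return True
--
--     is_there_any_two_lower = False
--
--     for item in path:
--         if(item.islower() and path.count(item) > 1):
--             is_there_any_two_lower = True
--
--     if(is_there_any_two_lower and path.count(rule) >= 1):
--         return False
--
--     return True
--
-- def find_continued(path, rules, first_task):
--     continued = []
--     if(path[-1] == 'end'):
--         return continued
--
--     if(first_task):
--         for rule in rules:
--             if(path[-1] == rule[0] and (rule[1].isupper() or rule[1] not in path) and rule[1] != 'start'):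
--                 continued.append(rule[1])
--
--             if(path[-1] == rule[1] and (rule[0].isupper() or rule[0] not in path) and rule[0] != 'start'):
--                 continued.append(rule[0])
--
--     else:
--         for rule in rules:
--             if(path[-1] == rule[0] and (rule[1].isupper() or two_lower(path, rule[1])) and rule[1] != 'start'):
--                 continued.append(rule[1])
--
--             if(path[-1] == rule[1] and (rule[0].isupper() or two_lower(path, rule[0])) and rule[0] != 'start'):
--                 continued.append(rule[0])
--
--     return continued
-- ===== SOURCE B (Python) =====
-- def two_lower(path, rule):
--     return rule not in path or not any(
--         item.islower() and path.count(item) > 1 for item in path)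
--
--
-- def find_continued(path, rules, first_task):
--     if path[-1] == 'end':
--         return []
--     adj = {}
--     for a, b in rules:
--         adj.setdefault(a, []).append(b)
--         adj.setdefault(b, []).append(a)
--     last = path[-1]
--
--     def ok(n):
--         return n != 'start' and (n.isupper() or
--                                  (n not in path if first_task else two_lower(path, n)))
--
--     return [n for n in adj.get(last, []) if ok(n)]
-- ===== Notes on version B (the rewrite author's own statement) =====
-- stated objective: idiomatic
-- what changed: B builds an adjacency dict from the rules once and filters the neighbour list of path[-1] with a single predicate, instead of A's duplicated four-condition scan over every rule per branch; two_lower becomes a one-line any/membership expression.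
import Mathlib
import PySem

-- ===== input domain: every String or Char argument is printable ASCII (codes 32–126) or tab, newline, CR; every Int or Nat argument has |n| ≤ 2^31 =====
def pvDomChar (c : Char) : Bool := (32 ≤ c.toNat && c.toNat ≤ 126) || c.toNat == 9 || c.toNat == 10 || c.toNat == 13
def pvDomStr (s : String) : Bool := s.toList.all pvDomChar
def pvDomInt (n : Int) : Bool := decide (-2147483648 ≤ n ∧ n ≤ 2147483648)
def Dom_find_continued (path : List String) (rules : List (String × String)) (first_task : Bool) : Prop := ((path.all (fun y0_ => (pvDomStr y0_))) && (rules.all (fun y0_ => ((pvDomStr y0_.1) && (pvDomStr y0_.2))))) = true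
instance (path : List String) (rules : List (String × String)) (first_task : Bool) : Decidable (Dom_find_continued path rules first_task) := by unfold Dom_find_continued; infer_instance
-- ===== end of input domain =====

-- B replaces A's per-branch scans of the whole rule list by an adjacency dict built once
-- plus a single filtered neighbour lookup (idiomatic; same asymptotic cost).

-- str.isupper() / str.islower(): at least one cased character and no cased character of the
-- opposite case; exact on the ASCII domain, where the cased characters are exactly a-z/A-Z.
def pyStrIsupper (s : String) : Bool :=
  s.toList.any PySem.Chars.isupper && !(s.toList.any PySem.Chars.islower)

def pyStrIslower (s : String) : Bool :=
  s.toList.any PySem.Chars.islower && !(s.toList.any PySem.Chars.isupper)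

-- ===== PORT A =====
def two_lower (path : List String) (rule : String) : Bool :=
  if path.count rule == 0 then true
  else
    let is_there_any_two_lower :=
      path.foldl (fun f item => if pyStrIslower item && path.count item > 1 then true else f) false
    if is_there_any_two_lower && path.count rule ≥ 1 then false else true

def find_continued (path : List String) (rules : List (String × String)) (first_task : Bool) : List String :=
  match PySem.List.pyGet? path (-1) with
  | none => []   -- IndexError on empty path; excluded by Pre_
  | some last =>
    if last == "end" then []
    else if first_task then
      rules.foldl (fun continued rule =>
        let continued :=
          if last == rule.1 && ((pyStrIsupper rule.2 || !(path.contains rule.2)) && rule.2 != "start")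
          then continued ++ [rule.2] else continued
        if last == rule.2 && ((pyStrIsupper rule.1 || !(path.contains rule.1)) && rule.1 != "start")
        then continued ++ [rule.1] else continued) []
    else
      rules.foldl (fun continued rule =>
        let continued :=
          if last == rule.1 && ((pyStrIsupper rule.2 || two_lower path rule.2) && rule.2 != "start")
          then continued ++ [rule.2] else continued
        if last == rule.2 && ((pyStrIsupper rule.1 || two_lower path rule.1) && rule.1 != "start")
        then continued ++ [rule.1] else continued) []

-- ===== PORT B =====
def two_lower_alt (path : List String) (rule : String) : Bool :=
  !(path.contains rule) ||
    !(path.any (fun item => pyStrIslower item && path.count item > 1))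

def find_continued_alt (path : List String) (rules : List (String × String)) (first_task : Bool) : List String :=
  match PySem.List.pyGet? path (-1) with
  | none => []   -- IndexError on empty path; excluded by Pre_
  | some lastStart =>
    if lastStart == "end" then []
    else
      -- adj.setdefault(a, []).append(b) is Dict.modify a [] (· ++ [b])
      let adj := rules.foldl
        (fun d r => (d.modify r.1 [] (· ++ [r.2])).modify r.2 [] (· ++ [r.1]))
        PySem.Dict.empty
      let ok := fun n => n != "start" &&
        (pyStrIsupper n || (if first_task then !(path.contains n) else two_lower_alt path n))
      (adj.getD lastStart []).filter ok

-- ===== PRECONDITION & SPEC =====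
-- Pre_ excludes only the empty path, on which Python A raises IndexError at path[-1].
def Pre_find_continued (path : List String) (rules : List (String × String)) (first_task : Bool) : Prop :=
  path ≠ []
instance (path : List String) (rules : List (String × String)) (first_task : Bool) : Decidable (Pre_find_continued path rules first_task) := by unfold Pre_find_continued; infer_instance
def pvWitness_find_continued : List String × (List (String × String)) × Bool :=
  (["start"], [("start", "A"), ("A", "b")], true)

def Spec_find_continued (path : List String) (rules : List (String × String)) (first_task : Bool) (out : List String) : Prop := out = find_continued_alt path rules first_task
instance (path : List String) (rules : List (String × String)) (first_task : Bool) (out : List String) : Decidable (Spec_find_continued path rules first_task out) := by unfold Spec_find_continued; infer_instance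

-- ===== CLAIM (what is proved, stated in full; the proofs are below) =====
def Claim_equal_find_continued : Prop := ∀ (path : List String) (rules : List (String × String)) (first_task : Bool), Dom_find_continued path rules first_task → Pre_find_continued path rules first_task → Spec_find_continued path rules first_task (find_continued path rules first_task)

-- ===== LEMMAS AND PROOFS =====

-- A's flag loop is List.any.
theorem flag_foldl_eq_any (q : String → Bool) (l : List String) (f : Bool) :
    l.foldl (fun f item => if q item then true else f) f = (f || l.any q) := by
  induction l generalizing f with
  | nil => simp
  | cons x xs ih =>
    simp only [List.foldl_cons]
    rw [ih]
    by_cases h : q x = true <;> simp [h]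

theorem two_lower_eq (path : List String) (rule : String) :
    two_lower path rule = two_lower_alt path rule := by
  simp only [two_lower, two_lower_alt]
  rw [flag_foldl_eq_any]
  by_cases h0 : path.count rule = 0
  · have hm : ¬ rule ∈ path := by simpa [List.count_eq_zero] using h0
    simp [h0, hm]
  · have hm : rule ∈ path := by
      by_contra hn; exact h0 (List.count_eq_zero.mpr hn)
    have h1 : 1 ≤ path.count rule := Nat.one_le_iff_ne_zero.mpr h0
    by_cases ha : path.any (fun item => pyStrIslower item && path.count item > 1) = true <;>
      simp [h0, hm, h1, ha]

-- A's two-append loop over the rules is the filtered per-rule neighbour list.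
theorem loopA (last : String) (P : String → Bool) (rules : List (String × String))
    (acc : List String) :
    rules.foldl (fun continued rule =>
        if last == rule.2 && P rule.1
        then (if last == rule.1 && P rule.2 then continued ++ [rule.2] else continued) ++ [rule.1]
        else (if last == rule.1 && P rule.2 then continued ++ [rule.2] else continued)) acc
      = acc ++ (rules.flatMap (fun r =>
          (if last == r.1 then [r.2] else []) ++ (if last == r.2 then [r.1] else []))).filter P := by
  induction rules generalizing acc with
  | nil => simp
  | cons r rs ih =>
    simp only [List.foldl_cons, List.flatMap_cons, List.filter_append]
    rw [ih]
    by_cases h1 : (last == r.1) = true <;> by_cases h2 : (last == r.2) = true <;>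
      by_cases hp1 : P r.1 = true <;> by_cases hp2 : P r.2 = true <;>
        simp [h1, h2, hp1, hp2, List.append_assoc]

-- B's adjacency dict, looked up at one key, is the per-rule neighbour list.
theorem adj_getD (rules : List (String × String)) (d : PySem.Dict String (List String))
    (k : String) :
    (rules.foldl (fun d r => (d.modify r.1 [] (· ++ [r.2])).modify r.2 [] (· ++ [r.1])) d).getD k []
      = d.getD k [] ++ rules.flatMap (fun r =>
          (if k == r.1 then [r.2] else []) ++ (if k == r.2 then [r.1] else [])) := by
  induction rules generalizing d with
  | nil => simp
  | cons r rs ih =>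
    simp only [List.foldl_cons, List.flatMap_cons]
    rw [ih]
    have hhead : ((d.modify r.1 [] (· ++ [r.2])).modify r.2 [] (· ++ [r.1])).getD k []
        = d.getD k [] ++ ((if k == r.1 then [r.2] else []) ++ (if k == r.2 then [r.1] else [])) := by
      by_cases h1 : k = r.1 <;> by_cases h2 : k = r.2
      · subst h1
        rw [← h2, PySem.Dict.getD_modify_self, PySem.Dict.getD_modify_self]
        simp
      · subst h1
        rw [PySem.Dict.getD_modify_of_ne _ _ _ h2, PySem.Dict.getD_modify_self]
        simp [h2]
      · subst h2
        rw [PySem.Dict.getD_modify_self, PySem.Dict.getD_modify_of_ne _ _ _ h1]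
        simp [h1]
      · rw [PySem.Dict.getD_modify_of_ne _ _ _ h2, PySem.Dict.getD_modify_of_ne _ _ _ h1]
        simp [h1, h2]
    rw [hhead, List.append_assoc]

-- ===== VERDICT (by name: the statement is the Claim_ definition above) =====
theorem find_continued_spec : Claim_equal_find_continued := by
  intro path rules first_task _hDom _hPre
  unfold Spec_find_continued find_continued find_continued_alt
  cases hget : PySem.List.pyGet? path (-1) with
  | none => rfl
  | some last =>
    by_cases hend : (last == "end") = true
    · simp [hend]
    · cases first_task with
      | true =>
        have hA := loopA last (fun n => (pyStrIsupper n || !(path.contains n)) && n != "start")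
          rules []
        have hB := adj_getD rules PySem.Dict.empty last
        simp only [PySem.Dict.getD_empty, List.nil_append] at hA hB
        simp only [hend, if_false, Bool.false_eq_true, if_true]
        rw [hA, hB, List.filter_congr]
        intro n _
        exact Bool.and_comm _ _
      | false =>
        have hA := loopA last (fun n => (pyStrIsupper n || two_lower path n) && n != "start")
          rules []
        have hB := adj_getD rules PySem.Dict.empty last
        simp only [PySem.Dict.getD_empty, List.nil_append] at hA hB
        simp only [hend, if_false, Bool.false_eq_true]
        rw [hA, hB, List.filter_congr]
        intro n _
        simp only [two_lower_eq]
        exact Bool.and_comm _ _
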